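-- pv_equiv track=rewrite | github.com/evgenygurin/astroloh | app/services/progression_service.py | _analyze_life_phase
-- ===== SOURCE A (Python) =====
-- def _analyze_life_phase(days_progressed: int) -> str:
--     """Анализирует жизненную фазу."""
--     age = days_progressed // 365
--
--     phases = {
--         (0, 28): "Формирование и поиск своего пути",
--         (28, 56): "Реализация и достижение целей",
--         (56, 84): "Мудрость и передача опыта"
--     }
--
--     for (start, end), phase in phases.items():
--         if start <= age < end:
--             return phase
--
--     return "Особый жизненный период"
-- ===== SOURCE B (Python) =====
-- _PHASES = (
--     "Формирование и поиск своего пути",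
--     "Реализация и достижение целей",
--     "Мудрость и передача опыта",
-- )
--
--
-- def _analyze_life_phase(days_progressed: int) -> str:
--     """All three bands have equal width 28 years: index directly."""
--     idx = days_progressed // 365 // 28
--     if 0 <= idx < 3:
--         return _PHASES[idx]
--     return "Особый жизненный период"
-- ===== Notes on version B (the rewrite author's own statement) =====
-- stated objective: idiomatic
-- what changed: Replaces the range-dict scan with closed-form arithmetic: since the three bands have equal width, the age divided by the band width indexes a fixed tuple of phase names, so the loop disappears.
import Mathlib
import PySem

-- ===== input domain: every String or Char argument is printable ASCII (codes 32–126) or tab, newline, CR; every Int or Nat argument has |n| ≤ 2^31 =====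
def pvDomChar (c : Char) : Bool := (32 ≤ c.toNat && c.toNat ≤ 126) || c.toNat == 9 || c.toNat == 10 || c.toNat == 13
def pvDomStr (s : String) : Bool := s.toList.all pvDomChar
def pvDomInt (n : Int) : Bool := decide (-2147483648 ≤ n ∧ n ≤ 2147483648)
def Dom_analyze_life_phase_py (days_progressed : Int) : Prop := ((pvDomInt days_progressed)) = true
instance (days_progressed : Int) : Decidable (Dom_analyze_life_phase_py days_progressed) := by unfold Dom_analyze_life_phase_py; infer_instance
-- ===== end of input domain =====

-- B replaces A's ordered scan of a range dictionary with closed-form indexing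
-- (idx = age // 28 into a fixed phase list); objective: idiomatic, same cost.

-- ===== PORT A =====
-- the dict of A, as an insertion-ordered association list of ((start, end), phase)
def pvPhasesDict : List ((Int × Int) × String) :=
  [((0, 28), "Формирование и поиск своего пути"),
   ((28, 56), "Реализация и достижение целей"),
   ((56, 84), "Мудрость и передача опыта")]

-- the for-loop over phases.items(): first matching band wins, else the default
def pvScanPhases (age : Int) : List ((Int × Int) × String) → String
  | [] => "Особый жизненный период"
  | ((start, end_), phase) :: rest =>
      if start ≤ age ∧ age < end_ then phase else pvScanPhases age rest

def analyze_life_phase_py (days_progressed : Int) : String :=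
  let age := PySem.Int.floordiv days_progressed 365
  pvScanPhases age pvPhasesDict

-- ===== PORT B =====
def pvPhaseList : List String :=
  ["Формирование и поиск своего пути",
   "Реализация и достижение целей",
   "Мудрость и передача опыта"]

def analyze_life_phase_py_alt (days_progressed : Int) : String :=
  let idx := PySem.Int.floordiv (PySem.Int.floordiv days_progressed 365) 28
  if 0 ≤ idx ∧ idx < 3 then
    (PySem.List.pyGet? pvPhaseList idx).getD "Особый жизненный период"
  else
    "Особый жизненный период"

-- ===== PRECONDITION & SPEC =====
def Spec_analyze_life_phase_py (days_progressed : Int) (out : String) : Prop := out = analyze_life_phase_py_alt days_progressed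
instance (days_progressed : Int) (out : String) : Decidable (Spec_analyze_life_phase_py days_progressed out) := by unfold Spec_analyze_life_phase_py; infer_instance

-- ===== CLAIM (what is proved, stated in full; the proofs are below) =====
def Claim_equal_analyze_life_phase_py : Prop := ∀ (days_progressed : Int), Dom_analyze_life_phase_py days_progressed → Spec_analyze_life_phase_py days_progressed (analyze_life_phase_py days_progressed)

-- ===== LEMMAS AND PROOFS =====

-- both programs agree for every age, band by band
theorem pv_agree_age (age : Int) :
    pvScanPhases age pvPhasesDict =
      (if 0 ≤ PySem.Int.floordiv age 28 ∧ PySem.Int.floordiv age 28 < 3 then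
        (PySem.List.pyGet? pvPhaseList (PySem.Int.floordiv age 28)).getD "Особый жизненный период"
      else "Особый жизненный период") := by
  have h28 : PySem.Int.floordiv age 28 = age / 28 :=
    PySem.Int.floordiv_eq_ediv_of_pos (by omega)
  rw [h28]
  simp only [pvScanPhases, pvPhasesDict]
  by_cases h0 : 0 ≤ age ∧ age < 28
  · have : age / 28 = 0 := by omega
    simp [h0, this, PySem.List.pyGet?, PySem.List.pyIdx?, pvPhaseList]
  · by_cases h1 : 28 ≤ age ∧ age < 56
    · have : age / 28 = 1 := by omega
      simp [h0, h1, this, PySem.List.pyGet?, PySem.List.pyIdx?, pvPhaseList]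
    · by_cases h2 : 56 ≤ age ∧ age < 84
      · have : age / 28 = 2 := by omega
        simp [h0, h1, h2, this, PySem.List.pyGet?, PySem.List.pyIdx?, pvPhaseList]
      · have : ¬ (0 ≤ age / 28 ∧ age / 28 < 3) := by omega
        simp [h0, h1, h2, this]

-- ===== VERDICT (by name: the statement is the Claim_ definition above) =====
theorem analyze_life_phase_py_spec : Claim_equal_analyze_life_phase_py := by
  intro d _
  unfold Spec_analyze_life_phase_py analyze_life_phase_py analyze_life_phase_py_alt
  exact pv_agree_age (PySem.Int.floordiv d 365)
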